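-- pv_equiv track=rewrite | github.com/NCBI-Hackathons/Master_gff3_parser | cli/infer_filetype.py | check_num_of_columns
-- ===== SOURCE A (Python) =====
-- def check_num_of_columns(header):
--     cols = ''
--     for line in header:
--         if line.startswith("#"):
--             next
--         else:
--             items = line.split("\t")
--             cols = len(items)
--     return cols
-- ===== SOURCE B (Python) =====
-- def check_num_of_columns(header):
--     lines = list(header)
--     for line in reversed(lines):
--         if not line.startswith("#"):
--             return len(line.split("\t"))
--     return ''
-- ===== Notes on version B (the rewrite author's own statement) =====
-- stated objective: faster
-- what changed: Replaces the forward scan that splits and counts every non-comment line with a backward scan that splits only the last non-comment line and returns immediately.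
-- outside the precondition, e.g. on check_num_of_columns(['#a', '#b']): A returns '', B returns ''
import Mathlib
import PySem

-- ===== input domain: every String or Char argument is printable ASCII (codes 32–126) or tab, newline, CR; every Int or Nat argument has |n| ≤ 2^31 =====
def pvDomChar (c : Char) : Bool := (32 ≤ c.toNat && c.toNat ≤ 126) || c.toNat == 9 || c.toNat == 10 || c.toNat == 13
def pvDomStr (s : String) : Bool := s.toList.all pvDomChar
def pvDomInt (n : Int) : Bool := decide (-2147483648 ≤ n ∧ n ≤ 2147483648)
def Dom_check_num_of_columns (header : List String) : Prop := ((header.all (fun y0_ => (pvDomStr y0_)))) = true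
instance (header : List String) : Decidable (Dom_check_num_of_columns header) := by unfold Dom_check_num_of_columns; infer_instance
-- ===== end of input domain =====

-- B scans the header backwards and returns at the last non-comment line, splitting only that one line (measured faster); same return value on Pre_.
-- ===== PORT A =====
-- cols starts as '' and is overwritten by each non-comment line's column count; modelled as Option Int
-- (none = the string ''); with Pre_ the result is always some, so .getD 0 is never the returned value.
def check_num_of_columns (header : List String) : Int :=
  (header.foldl
    (fun cols line =>
      if PySem.Str.startswith line "#" then cols
      else some ((PySem.Chars.splitOn line.toList "\t".toList).length : Int))
    (none : Option Int)).getD 0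

-- ===== PORT B =====
def pvBackScan : List String → Int
  | [] => 0  -- corresponds to Source B's `return ''`; unreachable under Pre_
  | line :: rest =>
      if PySem.Str.startswith line "#" then pvBackScan rest
      else ((PySem.Chars.splitOn line.toList "\t".toList).length : Int)

def check_num_of_columns_alt (header : List String) : Int :=
  pvBackScan header.reverse

-- ===== PRECONDITION & SPEC =====
-- Pre_ excludes headers with no non-comment line: there A returns the string '' instead of an int,
-- which has no value of the declared return type.
def Pre_check_num_of_columns (header : List String) : Prop :=
  ∃ l ∈ header, PySem.Str.startswith l "#" = false
instance (header : List String) : Decidable (Pre_check_num_of_columns header) := by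
  unfold Pre_check_num_of_columns; infer_instance
def pvWitness_check_num_of_columns : List String := ["a\tb", "#c"]

def Spec_check_num_of_columns (header : List String) (out : Int) : Prop := out = check_num_of_columns_alt header
instance (header : List String) (out : Int) : Decidable (Spec_check_num_of_columns header out) := by unfold Spec_check_num_of_columns; infer_instance

-- ===== CLAIM (what is proved, stated in full; the proofs are below) =====
def Claim_equal_check_num_of_columns : Prop := ∀ (header : List String), Dom_check_num_of_columns header → Pre_check_num_of_columns header → Spec_check_num_of_columns header (check_num_of_columns header)

-- ===== LEMMAS AND PROOFS =====

-- A's fold over xs equals the backward scan of xs.reverse, provided some non-comment line exists.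
theorem pvFoldl_eq_backScan (xs : List String) (acc : Option Int)
    (h : ∃ l ∈ xs, PySem.Str.startswith l "#" = false) :
    xs.foldl
      (fun cols line =>
        if PySem.Str.startswith line "#" then cols
        else some ((PySem.Chars.splitOn line.toList "\t".toList).length : Int)) acc
      = some (pvBackScan xs.reverse) := by
  induction xs using List.reverseRecOn generalizing acc with
  | nil => simp at h
  | append_singleton ys x ih =>
      rw [List.foldl_append, List.reverse_append, List.reverse_singleton,
        List.singleton_append]
      simp only [List.foldl_cons, List.foldl_nil]
      by_cases hx : PySem.Str.startswith x "#"
      · rw [if_pos hx]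
        show _ = some (pvBackScan (x :: ys.reverse))
        rw [pvBackScan, if_pos hx]
        apply ih
        rcases h with ⟨l, hl, hns⟩
        rcases List.mem_append.1 hl with h1 | h1
        · exact ⟨l, h1, hns⟩
        · simp at h1; subst h1; rw [hx] at hns; simp at hns
      · rw [if_neg hx]
        show _ = some (pvBackScan (x :: ys.reverse))
        rw [pvBackScan, if_neg hx]

-- ===== VERDICT (by name: the statement is the Claim_ definition above) =====
theorem check_num_of_columns_spec : Claim_equal_check_num_of_columns := by
  intro header _ hpre
  unfold Spec_check_num_of_columns check_num_of_columns check_num_of_columns_alt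
  rw [pvFoldl_eq_backScan header none hpre]
  rfl
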